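-- pv_equiv track=rewrite | github.com/ddaanet/edify | src/edify/session/status/cli.py | _count_raw_tasks
-- ===== SOURCE A (Python) =====
-- def _count_raw_tasks(content: str, section: str = "In-tree Tasks") -> int:
--     """Count task-like lines in a section (lines starting with ``- [``)."""
--     in_section = False
--     count = 0
--     for line in content.splitlines():
--         if line.startswith(f"## {section}"):
--             in_section = True
--             continue
--         if line.startswith("## ") and in_section:
--             break
--         if in_section and line.startswith("- ["):
--             count += 1
--     return count
-- ===== SOURCE B (Python) =====
-- def _count_raw_tasks(content: str, section: str = "In-tree Tasks") -> int:
--     """Count task-like lines in a section (lines starting with ``- [``)."""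
--     head = f"## {section}"
--     lines = iter(content.splitlines())
--     # phase 1: locate the section header
--     for line in lines:
--         if line.startswith(head):
--             break
--     else:
--         return 0
--     # phase 2: collect the section block (up to the next different header)
--     block = []
--     for line in lines:
--         if line.startswith("## ") and not line.startswith(head):
--             break
--         block.append(line)
--     # phase 3: count task lines
--     return sum(1 for line in block if line.startswith("- ["))
-- ===== Notes on version B (the rewrite author's own statement) =====
-- stated objective: alternative
-- what changed: Replaced the single flag-driven pass with a three-phase decomposition: locate the section header, collect the block up to the next different header, then count the task lines in the block.
import Mathlib
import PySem

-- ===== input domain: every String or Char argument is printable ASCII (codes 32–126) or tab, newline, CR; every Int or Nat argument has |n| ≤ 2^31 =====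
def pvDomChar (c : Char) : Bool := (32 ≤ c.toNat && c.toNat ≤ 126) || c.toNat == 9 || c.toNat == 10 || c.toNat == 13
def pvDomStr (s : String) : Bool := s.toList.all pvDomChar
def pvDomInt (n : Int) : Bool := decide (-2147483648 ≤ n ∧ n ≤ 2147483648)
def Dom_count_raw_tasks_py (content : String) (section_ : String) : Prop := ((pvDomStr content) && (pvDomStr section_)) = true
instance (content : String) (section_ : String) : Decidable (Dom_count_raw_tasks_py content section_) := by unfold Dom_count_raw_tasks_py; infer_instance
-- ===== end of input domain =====

-- B replaces A's single flag-driven pass by a locate/collect/count three-phase decomposition (alternative, same cost).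

-- ===== PORT A =====
-- the flag-driven loop: state = (in_section, count); returning `c` models `break`
def aLoop (head : List Char) : List (List Char) → Bool → Int → Int
  | [], _, c => c
  | l :: ls, ins, c =>
    if PySem.Chars.startswith l head then aLoop head ls true c
    else if PySem.Chars.startswith l "## ".toList && ins then c
    else if ins && PySem.Chars.startswith l "- [".toList then aLoop head ls ins (c + 1)
    else aLoop head ls ins c

def count_raw_tasks_py (content : String) (section_ : String) : Int :=
  aLoop ("## ".toList ++ section_.toList) (PySem.Chars.splitlines content.toList) false 0

-- ===== PORT B =====
-- phase 1: advance the line iterator past the first header line; none = for-else (no header)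
def bFind (head : List Char) : List (List Char) → Option (List (List Char))
  | [] => none
  | l :: ls => if PySem.Chars.startswith l head then some ls else bFind head ls

-- phase 2: the block = lines up to the next different "## " header
def bBlock (head : List Char) : List (List Char) → List (List Char)
  | [] => []
  | l :: ls =>
    if PySem.Chars.startswith l "## ".toList && !PySem.Chars.startswith l head then []
    else l :: bBlock head ls

def count_raw_tasks_py_alt (content : String) (section_ : String) : Int :=
  let head := "## ".toList ++ section_.toList
  match bFind head (PySem.Chars.splitlines content.toList) with
  | none => 0
  | some rest =>
    -- phase 3: count the task lines in the block
    ((bBlock head rest).countP (fun l => PySem.Chars.startswith l "- [".toList) : Int)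

-- ===== PRECONDITION & SPEC =====
def Spec_count_raw_tasks_py (content : String) (section_ : String) (out : Int) : Prop := out = count_raw_tasks_py_alt content section_
instance (content : String) (section_ : String) (out : Int) : Decidable (Spec_count_raw_tasks_py content section_ out) := by unfold Spec_count_raw_tasks_py; infer_instance

-- ===== CLAIM (what is proved, stated in full; the proofs are below) =====
def Claim_equal_count_raw_tasks_py : Prop := ∀ (content : String) (section_ : String), Dom_count_raw_tasks_py content section_ → Spec_count_raw_tasks_py content section_ (count_raw_tasks_py content section_)

-- ===== LEMMAS AND PROOFS =====

-- a line starting with "## <section>" starts with '#', so it is not a "- [" task line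
lemma not_task_of_head (l sec : List Char)
    (h : PySem.Chars.startswith l ('#' :: '#' :: ' ' :: sec) = true) :
    PySem.Chars.startswith l ['-', ' ', '['] = false := by
  rw [PySem.Chars.startswith_iff] at h
  obtain ⟨t, rfl⟩ := h
  by_contra hb
  have hb' : PySem.Chars.startswith ('#' :: ('#' :: (' ' :: sec)) ++ t) ['-', ' ', '['] = true := by
    cases hx : PySem.Chars.startswith ('#' :: ('#' :: (' ' :: sec)) ++ t) ['-', ' ', '['] with
    | true => rfl
    | false => exact absurd hx hb
  rw [PySem.Chars.startswith_iff] at hb'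
  obtain ⟨u, hu⟩ := hb'
  simp [List.cons_append] at hu

-- once in the section, A's loop adds exactly the task-line count of B's block
lemma aLoop_in (sec : List Char) (lines : List (List Char)) (c : Int) :
    aLoop ('#' :: '#' :: ' ' :: sec) lines true c
      = c + ((bBlock ('#' :: '#' :: ' ' :: sec) lines).countP
              (fun l => PySem.Chars.startswith l ['-', ' ', '[']) : Int) := by
  induction lines generalizing c with
  | nil => simp [aLoop, bBlock]
  | cons l ls ih =>
    simp only [aLoop, bBlock,
      show ("## ".toList : List Char) = ['#', '#', ' '] from rfl,
      show ("- [".toList : List Char) = ['-', ' ', '['] from rfl]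
    by_cases h1 : PySem.Chars.startswith l ('#' :: '#' :: ' ' :: sec) = true
    · have h3 := not_task_of_head l sec h1
      simp [h1, h3, List.countP_cons, ih]
    · by_cases h2 : PySem.Chars.startswith l ['#', '#', ' '] = true
      · simp [h1, h2]
      · by_cases h3 : PySem.Chars.startswith l ['-', ' ', '['] = true
        · simp [h1, h2, h3, List.countP_cons, ih]
          ring
        · simp [h1, h2, h3, ih]

-- before the section, A's loop scans for the header exactly as B's phase 1 does
lemma aLoop_out (head : List Char) (lines : List (List Char)) (c : Int) :
    aLoop head lines false c
      = match bFind head lines with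
        | none => c
        | some rest => aLoop head rest true c := by
  induction lines with
  | nil => simp [aLoop, bFind]
  | cons l ls ih =>
    simp only [aLoop, bFind]
    by_cases h1 : PySem.Chars.startswith l head = true
    · simp [h1]
    · simp [h1, ih]

-- ===== VERDICT (by name: the statement is the Claim_ definition above) =====
theorem count_raw_tasks_py_spec : Claim_equal_count_raw_tasks_py := by
  intro content section_ _
  unfold Spec_count_raw_tasks_py count_raw_tasks_py count_raw_tasks_py_alt
  rw [aLoop_out]
  cases hb : bFind ("## ".toList ++ section_.toList) (PySem.Chars.splitlines content.toList) <;>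
    simp only [show ("## ".toList : List Char) = ['#', '#', ' '] from rfl,
      List.cons_append, List.nil_append] at hb ⊢
  · simp [hb]
  · rw [hb, aLoop_in]; simp
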